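-- pv_equiv track=rewrite | github.com/awilkins/advent | advent/day_11/passwords.py | has_enough_pairs
-- ===== SOURCE A (Python) =====
-- from itertools import pairwise
--
-- def has_enough_pairs(line):
--
--     last_pair = -2
--     pair_total = 0
--     for index, (a, b) in enumerate(pairwise(line)):
--         if a == b and index > last_pair + 1:
--             pair_total += 1
--             last_pair = index
--
--     return pair_total > 1
-- ===== SOURCE B (Python) =====
-- def has_enough_pairs(line):
--     positions = [i for i in range(len(line) - 1) if line[i] == line[i + 1]]
--     return bool(positions) and positions[-1] - positions[0] >= 2
-- ===== Notes on version B (the rewrite author's own statement) =====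
-- stated objective: alternative
-- what changed: Replaces A's single counting pass with a last_pair sentinel by two stages: build the list of all adjacent-equal positions, then decide by the closed-form gap test last-first >= 2 (equivalent to having two non-overlapping pairs), with no counting or skipping at all.
import Mathlib
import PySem

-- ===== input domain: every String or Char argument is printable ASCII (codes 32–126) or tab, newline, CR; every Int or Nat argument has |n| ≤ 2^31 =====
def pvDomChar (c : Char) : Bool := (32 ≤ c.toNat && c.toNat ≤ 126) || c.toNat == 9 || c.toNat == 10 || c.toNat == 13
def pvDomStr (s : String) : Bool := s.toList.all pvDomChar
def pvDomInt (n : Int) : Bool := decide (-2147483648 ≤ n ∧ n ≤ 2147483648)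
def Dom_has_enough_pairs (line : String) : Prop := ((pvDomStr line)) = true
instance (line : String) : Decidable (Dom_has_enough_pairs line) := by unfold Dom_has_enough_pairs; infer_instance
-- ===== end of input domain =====

-- B replaces A's counting pass with a sentinel by two stages: collect all
-- adjacent-equal positions, then test the closed-form gap last-first >= 2.

-- ===== PORT A =====
-- itertools.pairwise(line): adjacent pairs of the string's characters
def pairsOfA (cs : List Char) : List (Char × Char) := cs.zip cs.tail

-- the for-loop over enumerate(pairwise(line)) with state (last_pair, pair_total),
-- carrying the running index
def loopA : List (Char × Char) → Int → Int → Int → Int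
  | [], _, _, pair_total => pair_total
  | (a, b) :: rest, index, last_pair, pair_total =>
    if a = b ∧ index > last_pair + 1 then
      loopA rest (index + 1) index (pair_total + 1)
    else
      loopA rest (index + 1) last_pair pair_total

def has_enough_pairs (line : String) : Bool :=
  decide (loopA (pairsOfA line.toList) 0 (-2) 0 > 1)

-- ===== PORT B =====
-- the comprehension '[i for i in range(len(line)-1) if line[i]==line[i+1]]'
-- (indices are always in range here, so getD's default is never consulted)
def pairPositions (cs : List Char) : List Nat :=
  (List.range (cs.length - 1)).filter (fun i => cs.getD i ' ' == cs.getD (i + 1) ' ')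

-- 'return bool(positions) and positions[-1] - positions[0] >= 2'
def has_enough_pairs_alt (line : String) : Bool :=
  match pairPositions line.toList with
  | [] => false
  | p :: rest => decide (((p :: rest).getLast (by simp) : Int) - (p : Int) ≥ 2)

-- ===== PRECONDITION & SPEC =====
def Spec_has_enough_pairs (line : String) (out : Bool) : Prop := out = has_enough_pairs_alt line
instance (line : String) (out : Bool) : Decidable (Spec_has_enough_pairs line out) := by unfold Spec_has_enough_pairs; infer_instance

-- ===== CLAIM (what is proved, stated in full; the proofs are below) =====
def Claim_equal_has_enough_pairs : Prop := ∀ (line : String), Dom_has_enough_pairs line → Spec_has_enough_pairs line (has_enough_pairs line)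

-- ===== LEMMAS AND PROOFS =====

-- reference function: greedy count of non-overlapping equal adjacent pairs
def countPairs : List Char → Int
  | a :: b :: rest => if a = b then 1 + countPairs rest else countPairs (b :: rest)
  | _ => 0

theorem countPairs_short (l : List Char) (h : l.length ≤ 1) : countPairs l = 0 := by
  match l, h with
  | [], _ => rfl
  | [_], _ => rfl

theorem short_of_no_two (l : List Char) (h : ∀ (a b : Char) (rest : List Char), l ≠ a :: b :: rest) :
    l.length ≤ 1 := by
  match l with
  | [] => simp
  | [a] => simp
  | a :: b :: r => exact absurd rfl (h a b r)

theorem countPairs_nonneg (l : List Char) : 0 ≤ countPairs l := by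
  induction l using countPairs.induct with
  | case1 b rest ih => rw [countPairs, if_pos rfl]; omega
  | case2 a b rest hab ih => rw [countPairs, if_neg hab]; exact ih
  | case3 l h => rw [countPairs_short l (short_of_no_two l h)]

theorem loopA_eq (l : List Char) :
    ∀ (k lp t : Int), lp + 1 < k → loopA (pairsOfA l) k lp t = t + countPairs l := by
  induction l using countPairs.induct with
  | case1 b rest ih =>
    intro k lp t hk
    cases rest with
    | nil =>
      simp [pairsOfA, loopA, countPairs]
      omega
    | cons c rest' =>
      simp only [pairsOfA, List.tail_cons, List.zip_cons_cons]
      simp only [loopA, true_and, if_pos (show (k:Int) > lp + 1 from hk)]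
      have h2 : ¬ (b = c ∧ (k + 1 : Int) > k + 1) := by
        rintro ⟨_, h⟩; omega
      simp only [if_neg h2]
      have := ih (k + 2) k (t + 1) (by omega)
      simp only [pairsOfA, List.tail_cons] at this
      rw [show (k + 1 + 1 : Int) = k + 2 from by ring, this]
      simp [countPairs]
      omega
  | case2 a b rest hab ih =>
    intro k lp t hk
    simp only [pairsOfA, List.tail_cons, List.zip_cons_cons]
    have h1 : ¬ (a = b ∧ (k : Int) > lp + 1) := by rintro ⟨h, _⟩; exact hab h
    simp only [loopA, if_neg h1]
    have := ih (k + 1) lp t (by omega)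
    simp only [pairsOfA, List.tail_cons] at this
    rw [this, countPairs]
    simp [hab]
  | case3 l h =>
    match l, h with
    | [], _ => intro k lp t _; simp [pairsOfA, loopA, countPairs]
    | [a], _ => intro k lp t _; simp [pairsOfA, loopA, countPairs]
    | a :: b :: rest, h => exact absurd rfl (h a b rest)

-- the pair-position predicate
def IsPair (cs : List Char) (i : Nat) : Prop := ∃ h : i + 1 < cs.length, cs[i] = cs[i + 1]

theorem isPair_cons (c : Char) (l : List Char) (i : Nat) :
    IsPair (c :: l) (i + 1) ↔ IsPair l i := by
  unfold IsPair
  constructor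
  · rintro ⟨h, he⟩
    refine ⟨by simp at h; omega, ?_⟩
    simpa using he
  · rintro ⟨h, he⟩
    refine ⟨by simp; omega, ?_⟩
    simpa using he

theorem isPair_short (l : List Char) (hl : l.length ≤ 1) (i : Nat) : ¬ IsPair l i := by
  rintro ⟨h, _⟩
  omega

theorem countPairs_one (l : List Char) : 1 ≤ countPairs l ↔ ∃ i, IsPair l i := by
  induction l using countPairs.induct with
  | case1 b rest ih =>
    rw [countPairs, if_pos rfl]
    constructor
    · intro _; exact ⟨0, by simp [IsPair]⟩
    · intro _
      have := countPairs_nonneg rest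
      omega
  | case2 a b rest hab ih =>
    rw [countPairs, if_neg hab, ih]
    constructor
    · rintro ⟨i, hi⟩
      exact ⟨i + 1, (isPair_cons a _ i).mpr hi⟩
    · rintro ⟨i, hi⟩
      match i with
      | 0 =>
        obtain ⟨_, he⟩ := hi
        exact absurd (by simpa using he) hab
      | k + 1 => exact ⟨k, (isPair_cons a _ k).mp hi⟩
  | case3 l h =>
    have hl := short_of_no_two l h
    rw [countPairs_short l hl]
    constructor
    · omega
    · rintro ⟨i, hi⟩
      exact absurd hi (isPair_short l hl i)

theorem countPairs_two (l : List Char) :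
    2 ≤ countPairs l ↔ ∃ i j, i + 2 ≤ j ∧ IsPair l i ∧ IsPair l j := by
  induction l using countPairs.induct with
  | case1 b rest ih =>
    rw [countPairs, if_pos rfl]
    have h1 : (2 : Int) ≤ 1 + countPairs rest ↔ 1 ≤ countPairs rest := by omega
    rw [h1, countPairs_one]
    constructor
    · rintro ⟨k, hk⟩
      refine ⟨0, k + 2, by omega, ⟨by simp, by simp⟩, ?_⟩
      exact (isPair_cons b _ (k + 1)).mpr ((isPair_cons b _ k).mpr hk)
    · rintro ⟨i, j, hij, _, hj⟩
      match j, hij with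
      | k + 2, _ =>
        exact ⟨k, (isPair_cons b _ k).mp ((isPair_cons b _ (k + 1)).mp hj)⟩
  | case2 a b rest hab ih =>
    rw [countPairs, if_neg hab, ih]
    constructor
    · rintro ⟨i, j, hij, hi, hj⟩
      exact ⟨i + 1, j + 1, by omega, (isPair_cons a _ i).mpr hi, (isPair_cons a _ j).mpr hj⟩
    · rintro ⟨i, j, hij, hi, hj⟩
      match i with
      | 0 =>
        obtain ⟨_, he⟩ := hi
        exact absurd (by simpa using he) hab
      | k + 1 =>
        match j, hij with
        | m + 1, _ =>
          exact ⟨k, m, by omega, (isPair_cons a _ k).mp hi, (isPair_cons a _ m).mp hj⟩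
  | case3 l h =>
    have hl := short_of_no_two l h
    rw [countPairs_short l hl]
    constructor
    · omega
    · rintro ⟨i, j, _, hi, _⟩
      exact absurd hi (isPair_short l hl i)

theorem mem_pairPositions (cs : List Char) (i : Nat) :
    i ∈ pairPositions cs ↔ IsPair cs i := by
  simp only [pairPositions, List.mem_filter, List.mem_range, beq_iff_eq]
  constructor
  · rintro ⟨hlt, he⟩
    have h : i + 1 < cs.length := by omega
    refine ⟨h, ?_⟩
    rwa [List.getD_eq_getElem _ _ (by omega), List.getD_eq_getElem _ _ h] at he
  · rintro ⟨h, he⟩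
    refine ⟨by omega, ?_⟩
    rwa [List.getD_eq_getElem _ _ (by omega), List.getD_eq_getElem _ _ h]

theorem pairPositions_sorted (cs : List Char) : (pairPositions cs).Pairwise (· < ·) :=
  List.Pairwise.filter _ List.pairwise_lt_range

theorem mem_le_getLast (l : List Nat) (hs : l.Pairwise (· < ·)) (x : Nat) (hx : x ∈ l)
    (h : l ≠ []) : x ≤ l.getLast h := by
  induction l with
  | nil => simp at hx
  | cons a rest ih =>
    cases rest with
    | nil => simp at hx; simp [hx]
    | cons b rest' =>
      rw [List.getLast_cons (by simp)]
      rcases List.mem_cons.mp hx with rfl | hx'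
      · have hmem : (b :: rest').getLast (by simp) ∈ b :: rest' := List.getLast_mem _
        have := (List.pairwise_cons.mp hs).1 _ hmem
        omega
      · exact ih (List.pairwise_cons.mp hs).2 hx' (by simp)

-- ===== VERDICT (by name: the statement is the Claim_ definition above) =====
theorem has_enough_pairs_spec : Claim_equal_has_enough_pairs := by
  intro line _
  unfold Spec_has_enough_pairs
  rw [Bool.eq_iff_iff]
  unfold has_enough_pairs has_enough_pairs_alt
  rw [loopA_eq line.toList 0 (-2) 0 (by omega)]
  have hA : (decide ((0 : Int) + countPairs line.toList > 1) = true) ↔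
      2 ≤ countPairs line.toList := by
    rw [decide_eq_true_iff]; omega
  rw [hA, countPairs_two]
  have hsorted := pairPositions_sorted line.toList
  cases hP : pairPositions line.toList with
  | nil =>
    constructor
    · rintro ⟨i, j, _, hi, _⟩
      rw [← mem_pairPositions, hP] at hi
      simp at hi
    · intro h; simp at h
  | cons p rest =>
    rw [hP] at hsorted
    simp only [decide_eq_true_iff]
    constructor
    · rintro ⟨i, j, hij, hi, hj⟩
      rw [← mem_pairPositions, hP] at hi hj
      have h1 : p ≤ i := by
        rcases List.mem_cons.mp hi with rfl | hi'
        · omega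
        · exact Nat.le_of_lt ((List.pairwise_cons.mp hsorted).1 _ hi')
      have h2 : j ≤ (p :: rest).getLast (by simp) := by
        refine mem_le_getLast _ hsorted _ ?_ (by simp)
        exact hj
      have hc : ((p : Int)) + 2 ≤ ((p :: rest).getLast (by simp) : Int) := by
        omega
      omega
    · intro hge
      have hmemL : (p :: rest).getLast (by simp) ∈ pairPositions line.toList := by
        rw [hP]; exact List.getLast_mem _
      have hmemH : p ∈ pairPositions line.toList := by rw [hP]; simp
      refine ⟨p, (p :: rest).getLast (by simp), by omega,
        (mem_pairPositions _ _).mp hmemH, (mem_pairPositions _ _).mp hmemL⟩
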